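-- pv_equiv track=rewrite | github.com/andrew732/EAS499 | poker_bot.py | paired_card
-- ===== SOURCE A (Python) =====
-- def paired_card(board_cards):
--     board = list(board_cards[::2])
--     casted_board = []
--     for num in board:
--         if num == 'A':
--             casted_board.append(14)
--         elif num == 'K':
--             casted_board.append(13)
--         elif num == 'Q':
--             casted_board.append(12)
--         elif num == 'J':
--             casted_board.append(11)
--         elif num == 'T':
--             casted_board.append(10)
--         else:
--             casted_board.append(int(num))
--     casted_board.sort(reverse=True)
--     for (i, j) in zip(casted_board, casted_board[1:]):
--         if i == j:
--             return i
--     return None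
-- ===== SOURCE B (Python) =====
-- def paired_card(board_cards):
--     face = {'A': 14, 'K': 13, 'Q': 12, 'J': 11, 'T': 10}
--     counts = {}
--     for ch in board_cards[::2]:
--         rank = face[ch] if ch in face else int(ch)
--         counts[rank] = counts.get(rank, 0) + 1
--     best = None
--     for rank, cnt in counts.items():
--         if cnt >= 2 and (best is None or rank > best):
--             best = rank
--     return best
-- ===== Notes on version B (the rewrite author's own statement) =====
-- stated objective: alternative
-- what changed: Replaces the descending sort plus adjacent-equal scan with a single-pass frequency dictionary followed by a max-over-keys-with-count>=2 scan; no sorting at all.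
import Mathlib
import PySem

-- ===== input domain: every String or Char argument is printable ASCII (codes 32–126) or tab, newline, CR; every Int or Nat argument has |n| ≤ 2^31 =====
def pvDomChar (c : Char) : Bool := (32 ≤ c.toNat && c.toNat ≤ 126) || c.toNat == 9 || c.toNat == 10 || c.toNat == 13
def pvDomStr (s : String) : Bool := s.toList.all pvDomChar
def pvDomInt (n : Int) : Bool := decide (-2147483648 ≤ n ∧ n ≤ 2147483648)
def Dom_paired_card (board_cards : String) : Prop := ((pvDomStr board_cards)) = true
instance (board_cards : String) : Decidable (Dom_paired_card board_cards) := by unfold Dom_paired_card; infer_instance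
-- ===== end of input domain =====

-- B replaces A's descending sort plus adjacent-equal scan by a frequency dictionary and a
-- max-over-keys-with-count≥2 scan (alternative algorithm, same exact result).

-- ===== PORT A =====
-- helper: the cast-and-append loop of A ('for num in board: … casted_board.append(…)');
-- int(num) → PySem.Int.ofChars? (none = ValueError, excluded by Pre_)
def pcCastLoop : List Char → List Int → Option (List Int)
  | [], acc => some acc
  | c :: rest, acc =>
    if c = 'A' then pcCastLoop rest (acc ++ [14])
    else if c = 'K' then pcCastLoop rest (acc ++ [13])
    else if c = 'Q' then pcCastLoop rest (acc ++ [12])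
    else if c = 'J' then pcCastLoop rest (acc ++ [11])
    else if c = 'T' then pcCastLoop rest (acc ++ [10])
    else match PySem.Int.ofChars? [c] with
      | none => none
      | some v => pcCastLoop rest (acc ++ [v])

-- helper: 'for (i, j) in zip(casted, casted[1:]): if i == j: return i'
def pcFindAdj : List Int → Option Int
  | i :: j :: t => if i = j then some i else pcFindAdj (j :: t)
  | _ => none

def paired_card (board_cards : String) : Option Int :=
  match PySem.Str.slice? board_cards none none 2 with   -- board_cards[::2]
  | none => none                                        -- unreachable (step ≠ 0)
  | some bs =>
    match pcCastLoop bs.toList [] with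
    | none => none                                      -- int() raised; outside Pre_
    | some casted => pcFindAdj (PySem.List.sorted casted (fun x => x) true)

-- ===== PORT B =====
def pcFace : PySem.Dict Char Int :=
  PySem.Dict.ofList [('A', 14), ('K', 13), ('Q', 12), ('J', 11), ('T', 10)]

-- helper: B's counting loop 'counts[rank] = counts.get(rank, 0) + 1'
def pcCountLoop : List Char → PySem.Dict Int Int → Option (PySem.Dict Int Int)
  | [], d => some d
  | c :: rest, d =>
    match (if pcFace.contains c then pcFace.get? c else PySem.Int.ofChars? [c]) with
    | none => none                                      -- int() raised; outside Pre_
    | some r => pcCountLoop rest (d.insert r (d.getD r 0 + 1))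

-- helper: B's max-filter loop 'if cnt >= 2 and (best is None or rank > best): best = rank'
def pcBestLoop : List (Int × Int) → Option Int → Option Int
  | [], best => best
  | (r, c) :: ps, best =>
    match best with
    | none => if 2 ≤ c then pcBestLoop ps (some r) else pcBestLoop ps none
    | some m => if 2 ≤ c ∧ m < r then pcBestLoop ps (some r) else pcBestLoop ps (some m)

def paired_card_alt (board_cards : String) : Option Int :=
  match PySem.Str.slice? board_cards none none 2 with   -- board_cards[::2]
  | none => none
  | some bs =>
    match pcCountLoop bs.toList PySem.Dict.empty with
    | none => none
    | some counts => pcBestLoop counts.items none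

-- ===== PRECONDITION & SPEC =====
-- the characters at even positions (flag = still-to-take) of board_cards
def pcEvensB {α : Type} : Bool → List α → List α
  | _, [] => []
  | true, x :: t => x :: pcEvensB false t
  | false, _ :: t => pcEvensB true t
def pcEvens {α : Type} (l : List α) : List α := pcEvensB true l

-- Pre_ excludes exactly the inputs where A raises ValueError: every character at an even
-- position must be a face letter A/K/Q/J/T or a decimal digit, else int(num) raises.
def Pre_paired_card (board_cards : String) : Prop :=
  ((pcEvens board_cards.toList).all
    (fun c => ['A', 'K', 'Q', 'J', 'T', '0', '1', '2', '3', '4',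
               '5', '6', '7', '8', '9'].contains c)) = true
instance (board_cards : String) : Decidable (Pre_paired_card board_cards) := by
  unfold Pre_paired_card; infer_instance

def pvWitness_paired_card : String := "AsAd7h"

def Spec_paired_card (board_cards : String) (out : Option Int) : Prop := out = paired_card_alt board_cards
instance (board_cards : String) (out : Option Int) : Decidable (Spec_paired_card board_cards out) := by unfold Spec_paired_card; infer_instance

-- ===== CLAIM (what is proved, stated in full; the proofs are below) =====
def Claim_equal_paired_card : Prop := ∀ (board_cards : String), Dom_paired_card board_cards → Pre_paired_card board_cards → Spec_paired_card board_cards (paired_card board_cards)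

-- ===== LEMMAS AND PROOFS =====

-- proof-only twin of pcEvens providing the two-step induction principle
def pcEvensN {α : Type} : List α → List α
  | [] => []
  | [x] => [x]
  | x :: _ :: t => x :: pcEvensN t

theorem pcEvens_cons_cons {α : Type} (x y : α) (t : List α) :
    pcEvens (x :: y :: t) = x :: pcEvens t := rfl

-- the numeric rank of an admitted character
def pcRank (c : Char) : Int :=
  if c = 'A' then 14 else if c = 'K' then 13 else if c = 'Q' then 12
  else if c = 'J' then 11 else if c = 'T' then 10
  else (PySem.Int.ofChars? [c]).getD 0

-- what both ports' results satisfy: none ↔ no duplicate; some v ↔ v is the largest duplicate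
def pcSpec (l : List Int) : Option Int → Prop
  | none => ∀ v : Int, l.count v ≤ 1
  | some v => 2 ≤ l.count v ∧ ∀ w : Int, 2 ≤ l.count w → w ≤ v

theorem pcSpec_unique (l : List Int) (o₁ o₂ : Option Int)
    (h₁ : pcSpec l o₁) (h₂ : pcSpec l o₂) : o₁ = o₂ := by
  cases o₁ with
  | none => cases o₂ with
    | none => rfl
    | some v => exact absurd h₂.1 (by have := h₁ v; omega)
  | some v => cases o₂ with
    | none => exact absurd h₁.1 (by have := h₂ v; omega)
    | some w => exact congrArg some (le_antisymm (h₂.2 v h₁.1) (h₁.2 w h₂.1))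

theorem pcSpec_perm {l l' : List Int} (h : l.Perm l') (o : Option Int)
    (hs : pcSpec l o) : pcSpec l' o := by
  cases o with
  | none => intro v; rw [← h.count_eq]; exact hs v
  | some v =>
    exact ⟨by rw [← h.count_eq]; exact hs.1,
           fun w hw => hs.2 w (by rw [h.count_eq]; exact hw)⟩

-- board_cards[::2] is pcEvens
theorem filterMap_range_evens {α : Type} (xs : List α) :
    (List.range ((xs.length + 1) / 2)).filterMap (fun k => xs[2 * k]?) = pcEvens xs := by
  induction xs using pcEvensN.induct with
  | case1 => simp [pcEvens, pcEvensB]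
  | case2 x => simp [pcEvens, pcEvensB, List.range_succ]
  | case3 x y t ih =>
    have hlen : (x :: y :: t).length = t.length + 2 := by simp
    have hc : ((x :: y :: t).length + 1) / 2 = (t.length + 1) / 2 + 1 := by
      rw [hlen]; omega
    rw [hc, List.range_succ_eq_map, List.filterMap_cons, List.filterMap_map]
    have h0 : (x :: y :: t)[2 * 0]? = some x := rfl
    rw [h0]
    have harg : ∀ k : ℕ, ((fun k => (x :: y :: t)[2 * k]?) ∘ (fun k => k + 1)) k
        = (fun k => t[2 * k]?) k := by
      intro k
      show (x :: y :: t)[2 * (k + 1)]? = t[2 * k]?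
      have : 2 * (k + 1) = 2 * k + 1 + 1 := by omega
      rw [this]
      simp
    rw [funext harg, pcEvens_cons_cons]
    exact congrArg (x :: ·) ih

theorem slice2_eq (xs : List Char) :
    PySem.List.slice? xs none none 2 = some (pcEvens xs) := by
  rw [← filterMap_range_evens xs]
  simp only [PySem.List.slice?, PySem.List.sliceIndices]
  norm_num
  cases xs with
  | nil => simp
  | cons a t =>
    rw [if_pos (by simp)]
    have hcnt : (((a :: t).length : Int) + 2 - 1) / 2
        = ((((a :: t).length + 1) / 2 : ℕ) : Int) := by omega
    rw [hcnt, Int.toNat_natCast]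
    apply List.filterMap_congr
    intro k _
    have h2k : (2 * (k : Int)).toNat = 2 * k := by omega
    rw [h2k]

theorem str_slice2_eq (s : String) :
    PySem.Str.slice? s none none 2 = some (String.ofList (pcEvens s.toList)) := by
  unfold PySem.Str.slice?
  rw [show PySem.Chars.slice? s.toList none none 2 = some (pcEvens s.toList) from slice2_eq _]
  rfl

-- admitted characters
def pcGood (c : Char) : Prop :=
  c ∈ ['A', 'K', 'Q', 'J', 'T', '0', '1', '2', '3', '4', '5', '6', '7', '8', '9']

theorem good_cases (c : Char) (h : pcGood c) :
    (PySem.Int.ofChars? [c]).isSome = true ∨ c = 'A' ∨ c = 'K' ∨ c = 'Q' ∨ c = 'J' ∨ c = 'T' := by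
  unfold pcGood at h
  simp only [List.mem_cons, List.not_mem_nil, or_false] at h
  rcases h with h | h | h | h | h | h | h | h | h | h | h | h | h | h | h <;> subst h <;>
    first | (right; decide) | (left; decide)

-- A's cast chain succeeds and produces pcRank on admitted characters
theorem castLoop_eq (cs : List Char) (h : ∀ c ∈ cs, pcGood c) :
    ∀ acc, pcCastLoop cs acc = some (acc ++ cs.map pcRank) := by
  induction cs with
  | nil => intro acc; simp [pcCastLoop]
  | cons c rest ih =>
    intro acc
    have hc := h c (by simp)
    have hrest : ∀ c ∈ rest, pcGood c := fun x hx => h x (by simp [hx])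
    have hmap : (c :: rest).map pcRank = pcRank c :: rest.map pcRank := rfl
    rcases good_cases c hc with hv | hA | hK | hQ | hJ | hT
    · -- digit branch
      by_cases hA : c = 'A'
      · subst hA; simp [pcCastLoop, pcRank, ih hrest]
      by_cases hK : c = 'K'
      · subst hK; simp [pcCastLoop, pcRank, ih hrest]
      by_cases hQ : c = 'Q'
      · subst hQ; simp [pcCastLoop, pcRank, ih hrest]
      by_cases hJ : c = 'J'
      · subst hJ; simp [pcCastLoop, pcRank, ih hrest]
      by_cases hT : c = 'T'
      · subst hT; simp [pcCastLoop, pcRank, ih hrest]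
      · obtain ⟨v, hv'⟩ := Option.isSome_iff_exists.mp hv
        simp only [pcCastLoop, if_neg hA, if_neg hK, if_neg hQ, if_neg hJ, if_neg hT, hv']
        rw [ih hrest, hmap]
        have hrk : pcRank c = v := by
          simp [pcRank, hA, hK, hQ, hJ, hT, hv']
        simp [hrk]
    · subst hA; simp [pcCastLoop, pcRank, ih hrest]
    · subst hK; simp [pcCastLoop, pcRank, ih hrest]
    · subst hQ; simp [pcCastLoop, pcRank, ih hrest]
    · subst hJ; simp [pcCastLoop, pcRank, ih hrest]
    · subst hT; simp [pcCastLoop, pcRank, ih hrest]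

-- B's per-character rank expression agrees with pcRank on admitted characters
theorem rankB_eq (c : Char) (h : pcGood c) :
    (if pcFace.contains c then pcFace.get? c else PySem.Int.ofChars? [c]) = some (pcRank c) := by
  unfold pcGood at h
  simp only [List.mem_cons, List.not_mem_nil, or_false] at h
  rcases h with h | h | h | h | h | h | h | h | h | h | h | h | h | h | h <;> subst h <;> decide

-- B's counting loop builds Counter(ranks)
theorem countLoop_eq (cs : List Char) (h : ∀ c ∈ cs, pcGood c) :
    ∀ d, pcCountLoop cs d
      = some ((cs.map pcRank).foldl (fun d r => d.insert r (d.getD r 0 + 1)) d) := by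
  induction cs with
  | nil => intro d; rfl
  | cons c rest ih =>
    intro d
    have hc := rankB_eq c (h c (by simp))
    have hrest : ∀ c ∈ rest, pcGood c := fun x hx => h x (by simp [hx])
    simp only [pcCountLoop, hc, List.map_cons, List.foldl_cons]
    exact ih hrest _

-- ===== A-side characterisation =====
theorem findAdj_spec (s : List Int) (hs : s.Pairwise (fun a b => b ≤ a)) :
    pcSpec s (pcFindAdj s) := by
  induction s using pcFindAdj.induct with
  | case3 t h =>
    match t, h with
    | [], _ => intro v; simp
    | [x], _ => intro v; simp [List.count_cons]; split <;> omega
    | (i :: j :: t'), h => exact absurd rfl (h i j t')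
  | case1 j t =>
    simp only [pcFindAdj]
    constructor
    · simp
    · intro w hw
      have hmem : w ∈ j :: j :: t := List.count_pos_iff.mp (by omega)
      rcases List.mem_cons.mp hmem with h | h
      · omega
      rcases List.mem_cons.mp h with h | h
      · omega
      · exact (List.pairwise_cons.mp hs).1 w (by simp [h])
  | case2 i j t hij ih =>
    simp only [pcFindAdj, if_neg hij]
    have htail : (j :: t).Pairwise (fun a b => b ≤ a) := (List.pairwise_cons.mp hs).2
    have hhead : ∀ y ∈ j :: t, y ≤ i := (List.pairwise_cons.mp hs).1
    have hij' : j < i := lt_of_le_of_ne (hhead j (by simp)) (fun h => hij h.symm)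
    have hnot : i ∉ j :: t := by
      intro hmem
      rcases List.mem_cons.mp hmem with h | h
      · exact hij h
      · have := (List.pairwise_cons.mp htail).1 i h
        omega
    have hcount : ∀ v : Int, (i :: j :: t).count v
        = (j :: t).count v + (if v = i then 1 else 0) := by
      intro v
      by_cases hv : v = i
      · subst hv
        rw [List.count_cons_self]
        simp [List.count_eq_zero_of_not_mem hnot]
      · rw [List.count_cons_of_ne (fun h => hv h.symm)]
        simp [hv]
    have IH := ih htail
    cases hfa : pcFindAdj (j :: t) with
    | none =>
      rw [hfa] at IH
      intro v
      rw [hcount v]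
      by_cases hv : v = i
      · rw [if_pos hv, hv, List.count_eq_zero_of_not_mem hnot]
      · rw [if_neg hv]
        have := IH v
        omega
    | some v =>
      rw [hfa] at IH
      obtain ⟨hv2, hvmax⟩ := IH
      constructor
      · rw [hcount v]; omega
      · intro w hw
        rw [hcount w] at hw
        by_cases hwi : w = i
        · rw [if_pos hwi, hwi, List.count_eq_zero_of_not_mem hnot] at hw
          omega
        · rw [if_neg hwi] at hw
          exact hvmax w (by omega)

-- ===== B-side characterisation =====
theorem bestLoop_mono (ps : List (Int × Int)) :
    ∀ m, ∃ m', pcBestLoop ps (some m) = some m' ∧ m ≤ m' := by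
  induction ps with
  | nil => intro m; exact ⟨m, rfl, le_refl m⟩
  | cons p ps ih =>
    intro m
    obtain ⟨r, c⟩ := p
    simp only [pcBestLoop]
    by_cases h : 2 ≤ c ∧ m < r
    · rw [if_pos h]
      obtain ⟨m', hm', hle⟩ := ih r
      exact ⟨m', hm', le_of_lt (lt_of_lt_of_le h.2 hle)⟩
    · rw [if_neg h]; exact ih m

theorem bestLoop_none_src (ps : List (Int × Int)) :
    pcBestLoop ps none = none → ∀ p ∈ ps, ¬ 2 ≤ p.2 := by
  induction ps with
  | nil => intro _ p hp; simp at hp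
  | cons p ps ih =>
    obtain ⟨r, c⟩ := p
    intro h q hq
    simp only [pcBestLoop] at h
    by_cases hc : 2 ≤ c
    · rw [if_pos hc] at h
      obtain ⟨m', hm', _⟩ := bestLoop_mono ps r
      rw [hm'] at h; exact absurd h (by simp)
    · rw [if_neg hc] at h
      rcases List.mem_cons.mp hq with hq | hq
      · subst hq; exact hc
      · exact ih h q hq

theorem bestLoop_some_src (ps : List (Int × Int)) :
    ∀ best m, pcBestLoop ps best = some m →
      best = some m ∨ ∃ c, (m, c) ∈ ps ∧ 2 ≤ c := by
  induction ps with
  | nil => intro best m h; exact Or.inl h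
  | cons p ps ih =>
    obtain ⟨r, c⟩ := p
    intro best m h
    cases best with
    | none =>
      simp only [pcBestLoop] at h
      by_cases hc : 2 ≤ c
      · rw [if_pos hc] at h
        rcases ih (some r) m h with h' | ⟨c', hc', h2⟩
        · exact Or.inr ⟨c, by simp [Option.some_inj.mp h'.symm], hc⟩
        · exact Or.inr ⟨c', by simp [hc'], h2⟩
      · rw [if_neg hc] at h
        rcases ih none m h with h' | ⟨c', hc', h2⟩
        · exact absurd h' (by simp)
        · exact Or.inr ⟨c', by simp [hc'], h2⟩
    | some m0 =>
      simp only [pcBestLoop] at h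
      by_cases hc : 2 ≤ c ∧ m0 < r
      · rw [if_pos hc] at h
        rcases ih (some r) m h with h' | ⟨c', hc', h2⟩
        · exact Or.inr ⟨c, by simp [Option.some_inj.mp h'.symm], hc.1⟩
        · exact Or.inr ⟨c', by simp [hc'], h2⟩
      · rw [if_neg hc] at h
        rcases ih (some m0) m h with h' | ⟨c', hc', h2⟩
        · exact Or.inl (h' ▸ rfl)
        · exact Or.inr ⟨c', by simp [hc'], h2⟩

theorem bestLoop_ub (ps : List (Int × Int)) :
    ∀ best m, pcBestLoop ps best = some m →
      ∀ p ∈ ps, 2 ≤ p.2 → p.1 ≤ m := by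
  induction ps with
  | nil => intro best m _ p hp; simp at hp
  | cons q ps ih =>
    obtain ⟨r, c⟩ := q
    intro best m h p hp h2
    obtain ⟨pr, pc⟩ := p
    rcases List.mem_cons.mp hp with hpq | hptail
    · -- p is the head (r, c)
      obtain ⟨hpr, hpc⟩ := Prod.mk.injEq pr pc r c ▸ hpq
      subst hpr; subst hpc
      show pr ≤ m
      have h2c : 2 ≤ pc := h2
      cases best with
      | none =>
        simp only [pcBestLoop] at h
        rw [if_pos h2c] at h
        obtain ⟨m', hm', hle⟩ := bestLoop_mono ps pr
        rw [hm'] at h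
        exact le_of_le_of_eq hle (Option.some_inj.mp h)
      | some m0 =>
        simp only [pcBestLoop] at h
        by_cases hcc : 2 ≤ pc ∧ m0 < pr
        · rw [if_pos hcc] at h
          obtain ⟨m', hm', hle⟩ := bestLoop_mono ps pr
          rw [hm'] at h
          exact le_of_le_of_eq hle (Option.some_inj.mp h)
        · rw [if_neg hcc] at h
          have hrm0 : pr ≤ m0 := by
            by_contra hlt
            exact hcc ⟨h2c, by omega⟩
          obtain ⟨m', hm', hle⟩ := bestLoop_mono ps m0
          rw [hm'] at h
          exact le_trans hrm0 (le_of_le_of_eq hle (Option.some_inj.mp h))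
    · -- p in the tail
      cases best with
      | none =>
        simp only [pcBestLoop] at h
        by_cases hc : 2 ≤ c
        · rw [if_pos hc] at h; exact ih (some r) m h (pr, pc) hptail h2
        · rw [if_neg hc] at h; exact ih none m h (pr, pc) hptail h2
      | some m0 =>
        simp only [pcBestLoop] at h
        by_cases hc : 2 ≤ c ∧ m0 < r
        · rw [if_pos hc] at h; exact ih (some r) m h (pr, pc) hptail h2
        · rw [if_neg hc] at h; exact ih (some m0) m h (pr, pc) hptail h2

theorem bestLoop_spec (l : List Int) :
    pcSpec l (pcBestLoop (PySem.Dict.counter l).items none) := by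
  have hitems : (PySem.Dict.counter l).items
      = (PySem.Set.ofList l).map (fun k => (k, (l.count k : Int))) :=
    PySem.Dict.items_counter l
  cases hres : pcBestLoop (PySem.Dict.counter l).items none with
  | none =>
    intro v
    by_contra hv
    have hv2 : 2 ≤ l.count v := by omega
    have hvl : v ∈ l := List.count_pos_iff.mp (by omega)
    have hvs : v ∈ PySem.Set.ofList l := (PySem.Set.mem_ofList l v).mpr hvl
    have hmem : (v, (l.count v : Int)) ∈ (PySem.Dict.counter l).items := by
      rw [hitems]; exact List.mem_map.mpr ⟨v, hvs, rfl⟩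
    have := bestLoop_none_src _ hres (v, (l.count v : Int)) hmem
    simp at this
    omega
  | some m =>
    rcases bestLoop_some_src _ none m hres with h | ⟨c, hmem, h2⟩
    · exact absurd h (by simp)
    constructor
    · rw [hitems] at hmem
      obtain ⟨k, _, hk⟩ := List.mem_map.mp hmem
      have hkm : k = m := congrArg Prod.fst hk
      have hc : (l.count k : Int) = c := congrArg Prod.snd hk
      subst hkm
      rw [← hc] at h2
      exact_mod_cast h2
    · intro w hw
      have hwl : w ∈ l := List.count_pos_iff.mp (by omega)
      have hmemw : (w, (l.count w : Int)) ∈ (PySem.Dict.counter l).items := by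
        rw [hitems]
        exact List.mem_map.mpr ⟨w, (PySem.Set.mem_ofList l w).mpr hwl, rfl⟩
      exact bestLoop_ub _ none m hres (w, (l.count w : Int)) hmemw (by simpa using hw)

-- ===== VERDICT (by name: the statement is the Claim_ definition above) =====
theorem paired_card_spec : Claim_equal_paired_card := by
  intro s _ hpre
  unfold Spec_paired_card paired_card paired_card_alt
  rw [str_slice2_eq s]
  have htl : (String.ofList (pcEvens s.toList)).toList = pcEvens s.toList := by simp
  simp only [htl]
  have hgood : ∀ c ∈ pcEvens s.toList, pcGood c := by
    intro c hc
    have := List.all_eq_true.mp hpre c hc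
    unfold pcGood
    simpa using this
  set cs := pcEvens s.toList with hcs
  set l := cs.map pcRank with hl
  rw [castLoop_eq cs hgood [], countLoop_eq cs hgood PySem.Dict.empty]
  simp only [List.nil_append]
  rw [show l.foldl (fun d r => d.insert r (d.getD r 0 + 1)) PySem.Dict.empty
        = PySem.Dict.counter l from PySem.Dict.foldl_insert_getD_add_one_eq_counter l]
  have hA : pcSpec l (pcFindAdj (PySem.List.sorted l (fun x => x) true)) := by
    have hsorted := PySem.List.sorted_pairwise_rev l (fun x => x)
    have := findAdj_spec _ hsorted
    exact pcSpec_perm (PySem.List.sorted_perm l (fun x => x) true) _ this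
  have hB : pcSpec l (pcBestLoop (PySem.Dict.counter l).items none) := bestLoop_spec l
  exact pcSpec_unique l _ _ hA hB
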